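-- pv_equiv track=rewrite | github.com/GeoscienceAustralia/sira | scripts/convert_excel_files_to_json.py | standardize_json_string
-- ===== SOURCE A (Python) =====
-- def standardize_json_string(json_string):
--
--     inside_brackets_flag = False
--
--     standard_json_string = ""
--     for i in range(0, len(json_string)):
--         if json_string[i] == '[':
--             inside_brackets_flag = True
--         if json_string[i] == ']':
--             inside_brackets_flag = False
--
--         if inside_brackets_flag:
--             if json_string[i] == '\"':
--                 standard_json_string += "\'"
--             else:
--                 standard_json_string += json_string[i]
--         else:
--             standard_json_string += json_string[i]
--
--         # Note: json object cant have python lists as keys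
--         # standard_json_string \
--         #     = standard_json_string.replace("\"[","[").replace("]\"","]")
--     return standard_json_string
-- ===== SOURCE B (Python) =====
-- def standardize_json_string(json_string):
--     # Segment strategy: ']' always ends a bracketed region, so split on ']',
--     # transform the part of each segment from its first '[' onward, rejoin.
--     out_segments = []
--     for seg in json_string.split(']'):
--         head, sep, tail = seg.partition('[')
--         out_segments.append(head + sep + "".join("'" if c == '"' else c for c in tail))
--     return ']'.join(out_segments)
-- ===== Notes on version B (the rewrite author's own statement) =====
-- stated objective: alternative
-- what changed: Replaces A's per-character inside-brackets boolean state machine with a segment decomposition: split the string on the closing bracket, in each segment replace double quotes with apostrophes only from the first opening bracket onward (str.partition plus a comprehension), and rejoin.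
import Mathlib
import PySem

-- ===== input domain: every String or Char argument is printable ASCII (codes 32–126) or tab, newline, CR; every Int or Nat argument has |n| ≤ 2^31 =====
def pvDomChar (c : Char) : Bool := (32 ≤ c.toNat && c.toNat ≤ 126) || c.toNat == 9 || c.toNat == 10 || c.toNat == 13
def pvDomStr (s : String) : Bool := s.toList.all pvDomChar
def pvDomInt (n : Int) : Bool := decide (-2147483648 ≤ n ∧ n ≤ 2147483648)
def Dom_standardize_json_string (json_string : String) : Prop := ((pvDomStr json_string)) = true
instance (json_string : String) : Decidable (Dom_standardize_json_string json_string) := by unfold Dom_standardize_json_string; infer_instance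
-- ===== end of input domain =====

-- B replaces A's per-character bracket-flag state machine by a split-on-']' /
-- transform-each-segment-from-its-first-'[' / rejoin decomposition (objective: alternative).

-- ===== PORT A =====
-- A's loop over the characters, threading the inside_brackets flag and the accumulated string.
def pvLoopA (s : List Char) (flag : Bool) (acc : List Char) : List Char :=
  match s with
  | [] => acc
  | c :: rest =>
    let flag := if c = '[' then true else flag
    let flag := if c = ']' then false else flag
    if flag then
      if c = '"' then pvLoopA rest flag (acc ++ ['\''])
      else pvLoopA rest flag (acc ++ [c])
    else pvLoopA rest flag (acc ++ [c])

def standardize_json_string (json_string : String) : String :=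
  String.ofList (pvLoopA json_string.toList false [])

-- ===== PORT B =====
-- seg.partition('[') : (part before the first '[', the '[' if any, the part after it)
def pvPartition (seg : List Char) : List Char × List Char × List Char :=
  let head := seg.takeWhile (· ≠ '[')
  match seg.dropWhile (· ≠ '[') with
  | [] => (head, [], [])
  | x :: xs => (head, [x], xs)

-- one transformed segment: head + sep + "".join("'" if c == '"' else c for c in tail)
def pvSeg (seg : List Char) : List Char :=
  let (head, sep, tail) := pvPartition seg
  head ++ sep ++ tail.map (fun c => if c = '"' then '\'' else c)

def standardize_json_string_alt (json_string : String) : String :=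
  String.ofList (List.intercalate [']'] ((json_string.toList.splitOn ']').map pvSeg))

-- ===== PRECONDITION & SPEC =====
def Spec_standardize_json_string (json_string : String) (out : String) : Prop := out = standardize_json_string_alt json_string
instance (json_string : String) (out : String) : Decidable (Spec_standardize_json_string json_string out) := by unfold Spec_standardize_json_string; infer_instance

-- ===== CLAIM (what is proved, stated in full; the proofs are below) =====
def Claim_equal_standardize_json_string : Prop := ∀ (json_string : String), Dom_standardize_json_string json_string → Spec_standardize_json_string json_string (standardize_json_string json_string)

-- ===== LEMMAS AND PROOFS =====

-- pvLoopA with a direct (non-accumulator) presentation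
def pvGoA (flag : Bool) : List Char → List Char
  | [] => []
  | c :: rest =>
    let f1 := if c = '[' then true else flag
    let f2 := if c = ']' then false else f1
    (if f2 then (if c = '"' then '\'' else c) else c) :: pvGoA f2 rest

lemma pvLoopA_eq_acc_goA (s : List Char) : ∀ flag acc, pvLoopA s flag acc = acc ++ pvGoA flag s := by
  induction s with
  | nil => intro flag acc; simp [pvLoopA, pvGoA]
  | cons c rest ih =>
    intro flag acc
    simp only [pvLoopA, pvGoA]
    split_ifs <;> simp [ih]

lemma pvGoA_append (xs : List Char) : ∀ flag ys,
    pvGoA flag (xs ++ ys) = pvGoA flag xs ++ pvGoA (xs.foldl (fun f c => if c = ']' then false else if c = '[' then true else f) flag) ys := by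
  induction xs with
  | nil => intro flag ys; simp [pvGoA]
  | cons c rest ih =>
    intro flag ys
    simp only [List.cons_append, pvGoA, List.foldl_cons]
    split_ifs <;> simp_all

-- inside the brackets (flag true, no ']'), A just maps quote→apostrophe
lemma pvGoA_true_of_no_rb (xs : List Char) (h : ']' ∉ xs) :
    pvGoA true xs = xs.map (fun c => if c = '"' then '\'' else c) := by
  induction xs with
  | nil => simp [pvGoA]
  | cons c rest ih =>
    simp only [List.mem_cons, not_or] at h
    have hc : c ≠ ']' := fun e => h.1 e.symm
    simp [pvGoA, hc, ih h.2]

-- on a ']'-free segment, A computes exactly B's segment transform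
lemma pvGoA_seg (seg : List Char) (h : ']' ∉ seg) : pvGoA false seg = pvSeg seg := by
  induction seg with
  | nil => simp [pvGoA, pvSeg, pvPartition]
  | cons c rest ih =>
    simp only [List.mem_cons, not_or] at h
    have hc' : c ≠ ']' := fun e => h.1 e.symm
    by_cases hc : c = '['
    · subst hc
      simp [pvGoA, pvSeg, pvPartition, pvGoA_true_of_no_rb rest h.2]
    · have hstep : pvSeg (c :: rest) = c :: pvSeg rest := by
        cases hrest : rest.dropWhile (fun x => !decide (x = '[')) <;>
          simp [pvSeg, pvPartition, hc, hrest]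
      rw [hstep, ← ih h.2]
      simp [pvGoA, hc, hc']

lemma pvIntercalate_cons (sep x : List Char) (y : List Char) (l : List (List Char)) :
    List.intercalate sep (x :: y :: l) = x ++ sep ++ List.intercalate sep (y :: l) := by
  simp [List.intercalate, List.intersperse]

-- A's whole loop equals B's split/transform/join, by strong induction on length
lemma pvMain : ∀ n (cs : List Char), cs.length ≤ n →
    pvGoA false cs = List.intercalate [']'] ((cs.splitOn ']').map pvSeg) := by
  intro n
  induction n with
  | zero =>
    intro cs h
    have : cs = [] := List.eq_nil_of_length_eq_zero (Nat.le_zero.mp h)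
    subst this
    simp [pvGoA, List.splitOn, pvSeg, pvPartition, List.intercalate]
  | succ n ih =>
    intro cs h
    by_cases hmem : ']' ∈ cs
    · -- split off the first ']'
      set seg := cs.takeWhile (· ≠ ']') with hseg
      have hdrop : cs.dropWhile (· ≠ ']') ≠ [] := by
        intro hnil
        have htd := List.takeWhile_append_dropWhile (p := (· ≠ ']')) (l := cs)
        rw [hnil, List.append_nil] at htd
        rw [← htd] at hmem
        have := List.mem_takeWhile_imp hmem
        simp at this
      obtain ⟨d, rest, hdr⟩ := List.exists_cons_of_ne_nil hdrop
      have hd : d = ']' := by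
        have h0 := List.head_dropWhile_not (p := fun x => decide (x ≠ ']')) (l := cs) hdrop
        simp only [hdr, List.head_cons] at h0
        simpa using h0
      subst hd
      have hcs : cs = seg ++ ']' :: rest := by
        rw [hseg, ← hdr, List.takeWhile_append_dropWhile]
      have hsegno : ']' ∉ seg := by
        intro hx
        have := List.mem_takeWhile_imp hx
        simp at this
      have hlen : rest.length ≤ n := by
        have := congrArg List.length hcs
        simp at this
        omega
      rw [hcs, pvGoA_append]
      have hsplit : (seg ++ ']' :: rest).splitOn ']' = seg :: rest.splitOn ']' := by
        have hno : ∀ x ∈ seg, ¬ (x == ']') = true := by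
          intro x hx
          simp only [beq_iff_eq]
          exact fun he => hsegno (he ▸ hx)
        simp only [List.splitOn]
        exact List.splitOnP_first _ seg hno ']' (by simp) rest
      rw [hsplit]
      have hne : rest.splitOn ']' ≠ [] := by
        simpa [List.splitOn] using List.splitOnP_ne_nil (· == ']') rest
      obtain ⟨y, l, hyl⟩ := List.exists_cons_of_ne_nil hne
      rw [List.map_cons, hyl, List.map_cons, pvIntercalate_cons, ← List.map_cons, ← hyl,
        ← ih rest hlen, pvGoA_seg seg hsegno]
      have htail : pvGoA (seg.foldl (fun f c => if c = ']' then false else if c = '[' then true else f) false) (']' :: rest)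
          = ']' :: pvGoA false rest := by
        simp [pvGoA]
      rw [htail]
      simp
    · have hno : ∀ x ∈ cs, ¬ (x == ']') = true := by
        intro x hx
        simp only [beq_iff_eq]
        exact fun he => hmem (he ▸ hx)
      have : cs.splitOn ']' = [cs] := by
        simp only [List.splitOn]
        exact List.splitOnP_eq_single _ cs hno
      rw [this]
      simp [List.intercalate, pvGoA_seg cs hmem]

-- ===== VERDICT (by name: the statement is the Claim_ definition above) =====
theorem standardize_json_string_spec : Claim_equal_standardize_json_string := by
  intro s _
  unfold Spec_standardize_json_string standardize_json_string standardize_json_string_alt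
  rw [pvLoopA_eq_acc_goA, List.nil_append, pvMain s.toList.length s.toList (le_refl _)]
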